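-- pv_equiv track=rewrite | github.com/gustavoa-villas/programacionweb | ejercicios/matrizReina.py | movimientos_reina
-- ===== SOURCE A (Python) =====
-- def movimientos_reina(posicion, tamaño, bloqueos):
--     bloqueos = set(bloqueos)
--     direcciones = [
--         (1, 0), (-1, 0),  # vertical
--         (0, 1), (0, -1),  # horizontal
--         (1, 1), (-1, -1), # diagonal principal
--         (1, -1), (-1, 1)  # diagonal secundaria
--     ]
--
--     movimientos = 0
--     x, y = posicion
--
--     for dx, dy in direcciones:
--         nx, ny = x + dx, y + dy
--         while 0 <= nx < tamaño and 0 <= ny < tamaño and (nx, ny) not in bloqueos: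
--             movimientos += 1
--             nx += dx
--             ny += dy
--
--     return movimientos
-- ===== SOURCE B (Python) =====
-- def _ray(x, y, dx, dy, tamaño, bloqueos):
--     # j-interval [lo, hi] of steps staying on the board, then nearest block on the ray
--     if dx == 0:
--         if not (0 <= x < tamaño):
--             return 0
--         lo, hi = (-y, tamaño - 1 - y) if dy == 1 else (y - tamaño + 1, y)
--     elif dy == 0:
--         if not (0 <= y < tamaño):
--             return 0
--         lo, hi = (-x, tamaño - 1 - x) if dx == 1 else (x - tamaño + 1, x)
--     else:
--         lx, ux = (-x, tamaño - 1 - x) if dx == 1 else (x - tamaño + 1, x)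
--         ly, uy = (-y, tamaño - 1 - y) if dy == 1 else (y - tamaño + 1, y)
--         lo, hi = max(lx, ly), min(ux, uy)
--     if lo > 1 or hi < 1:
--         return 0
--     best = hi + 1
--     for bx, by in bloqueos:
--         j = (bx - x) * dx if dx != 0 else (by - y) * dy
--         if bx == x + j * dx and by == y + j * dy and 1 <= j < best:
--             best = j
--     return min(hi, best - 1)
--
--
-- def movimientos_reina(posicion, tamaño, bloqueos):
--     x, y = posicion
--     return sum(_ray(x, y, dx, dy, tamaño, bloqueos)
--                for dx, dy in ((1, 0), (-1, 0), (0, 1), (0, -1),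
--                               (1, 1), (-1, -1), (1, -1), (-1, 1)))
-- ===== Notes on version B (the rewrite author's own statement) =====
-- stated objective: faster
-- what changed: B replaces A's cell-by-cell while-loop walk along each of the 8 rays (O(tamaño) steps per ray) by a closed-form distance-to-edge interval plus a single scan of bloqueos per ray for the nearest aligned blocking cell, so the cost depends on |bloqueos| instead of the board size.
import Mathlib
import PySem

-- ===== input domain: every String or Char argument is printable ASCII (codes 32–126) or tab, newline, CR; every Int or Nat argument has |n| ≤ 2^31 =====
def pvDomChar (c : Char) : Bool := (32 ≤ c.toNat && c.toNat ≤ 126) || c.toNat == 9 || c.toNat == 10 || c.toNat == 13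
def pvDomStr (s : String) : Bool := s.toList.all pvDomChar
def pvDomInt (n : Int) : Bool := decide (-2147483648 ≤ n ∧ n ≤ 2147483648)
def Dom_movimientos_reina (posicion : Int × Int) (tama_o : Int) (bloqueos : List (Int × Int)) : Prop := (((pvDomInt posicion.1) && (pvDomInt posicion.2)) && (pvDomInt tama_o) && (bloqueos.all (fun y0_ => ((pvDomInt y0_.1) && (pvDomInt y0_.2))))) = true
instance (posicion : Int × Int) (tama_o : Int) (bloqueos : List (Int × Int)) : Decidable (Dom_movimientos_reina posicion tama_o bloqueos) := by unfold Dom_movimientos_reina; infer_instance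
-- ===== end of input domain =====

-- B replaces A's cell-by-cell walk (O(tamaño) per ray) by a closed-form edge distance plus
-- one scan of bloqueos per ray for the nearest aligned block (O(|bloqueos|) per ray).

-- ===== PORT A =====
-- the while loop; fuel tam.toNat always suffices (a ray has at most tam free cells)
def pvWalkA (tam dx dy : Int) (s : List (Int × Int)) : Nat → Int → Int → Int → Int
  | 0, _, _, acc => acc
  | Nat.succ f, nx, ny, acc =>
    if 0 ≤ nx ∧ nx < tam ∧ 0 ≤ ny ∧ ny < tam ∧ ¬ ((nx, ny) ∈ s) then
      pvWalkA tam dx dy s f (nx + dx) (ny + dy) (acc + 1)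
    else acc

def movimientos_reina (posicion : Int × Int) (tama_o : Int) (bloqueos : List (Int × Int)) : Int :=
  let bloqueosS := PySem.Set.ofList bloqueos
  let direcciones : List (Int × Int) := [(1,0),(-1,0),(0,1),(0,-1),(1,1),(-1,-1),(1,-1),(-1,1)]
  let x := posicion.1
  let y := posicion.2
  direcciones.foldl
    (fun mov d => pvWalkA tama_o d.1 d.2 bloqueosS tama_o.toNat (x + d.1) (y + d.2) mov) 0

-- ===== PORT B =====
-- nearest aligned block in direction (dx,dy): min(init, min{j ≥ 1 | (x+j·dx, y+j·dy) ∈ bloqueos})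
def pvBest (x y dx dy : Int) (bloqueos : List (Int × Int)) (init : Int) : Int :=
  bloqueos.foldl
    (fun best b =>
      let j := if dx ≠ 0 then (b.1 - x) * dx else (b.2 - y) * dy
      if b.1 = x + j * dx ∧ b.2 = y + j * dy ∧ 1 ≤ j ∧ j < best then j else best)
    init

-- Source B's _ray: j-interval [lo, hi] staying on the board, then clip at the nearest block
def pvRay (x y dx dy tam : Int) (bloqueos : List (Int × Int)) : Int :=
  let bnds : Int → Int → Int × Int := fun c d =>
    if d = 1 then (-c, tam - 1 - c) else (c - tam + 1, c)
  let lohi : Option (Int × Int) :=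
    if dx = 0 then
      if 0 ≤ x ∧ x < tam then some (bnds y dy) else none
    else if dy = 0 then
      if 0 ≤ y ∧ y < tam then some (bnds x dx) else none
    else
      some (max (bnds x dx).1 (bnds y dy).1, min (bnds x dx).2 (bnds y dy).2)
  match lohi with
  | none => 0
  | some (lo, hi) =>
    if lo > 1 ∨ hi < 1 then 0
    else min hi (pvBest x y dx dy bloqueos (hi + 1) - 1)

def movimientos_reina_alt (posicion : Int × Int) (tama_o : Int) (bloqueos : List (Int × Int)) : Int :=
  let x := posicion.1
  let y := posicion.2
  ([(1,0),(-1,0),(0,1),(0,-1),(1,1),(-1,-1),(1,-1),(-1,1)] : List (Int × Int)).foldl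
    (fun total d => total + pvRay x y d.1 d.2 tama_o bloqueos) 0

-- ===== PRECONDITION & SPEC =====
def Spec_movimientos_reina (posicion : Int × Int) (tama_o : Int) (bloqueos : List (Int × Int)) (out : Int) : Prop := out = movimientos_reina_alt posicion tama_o bloqueos
instance (posicion : Int × Int) (tama_o : Int) (bloqueos : List (Int × Int)) (out : Int) : Decidable (Spec_movimientos_reina posicion tama_o bloqueos out) := by unfold Spec_movimientos_reina; infer_instance

-- ===== CLAIM (what is proved, stated in full; the proofs are below) =====
def Claim_equal_movimientos_reina : Prop := ∀ (posicion : Int × Int) (tama_o : Int) (bloqueos : List (Int × Int)), Dom_movimientos_reina posicion tama_o bloqueos → Spec_movimientos_reina posicion tama_o bloqueos (movimientos_reina posicion tama_o bloqueos)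

-- ===== LEMMAS AND PROOFS =====

lemma pvWalkA_stop (tam dx dy : Int) (s : List (Int × Int)) (f : Nat) (nx ny acc : Int)
    (h : ¬ (0 ≤ nx ∧ nx < tam ∧ 0 ≤ ny ∧ ny < tam ∧ ¬ ((nx, ny) ∈ s))) :
    pvWalkA tam dx dy s f nx ny acc = acc := by
  cases f with
  | zero => rfl
  | succ f => simp [pvWalkA, if_neg h]

-- the j computed by pvBest's step is the unique aligned step index
lemma pvJb_eq (x y dx dy : Int) (hdd : dx * dx = 1 ∨ (dx = 0 ∧ dy * dy = 1))
    (b : Int × Int) (j : Int) (h1 : b.1 = x + j * dx) (h2 : b.2 = y + j * dy) :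
    (if dx ≠ 0 then (b.1 - x) * dx else (b.2 - y) * dy) = j := by
  rcases hdd with h | ⟨h0, h⟩
  · have hne : dx ≠ 0 := by intro e; rw [e] at h; norm_num at h
    rw [if_pos hne, h1]
    have : (x + j * dx - x) * dx = j * (dx * dx) := by ring
    rw [this, h]; ring
  · rw [if_neg (by simp [h0]), h2]
    have : (y + j * dy - y) * dy = j * (dy * dy) := by ring
    rw [this, h]; ring

lemma pvBest_cons (x y dx dy : Int) (b : Int × Int) (rest : List (Int × Int)) (init : Int) :
    pvBest x y dx dy (b :: rest) init =
      pvBest x y dx dy rest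
        (if b.1 = x + (if dx ≠ 0 then (b.1 - x) * dx else (b.2 - y) * dy) * dx ∧
            b.2 = y + (if dx ≠ 0 then (b.1 - x) * dx else (b.2 - y) * dy) * dy ∧
            1 ≤ (if dx ≠ 0 then (b.1 - x) * dx else (b.2 - y) * dy) ∧
            (if dx ≠ 0 then (b.1 - x) * dx else (b.2 - y) * dy) < init
         then (if dx ≠ 0 then (b.1 - x) * dx else (b.2 - y) * dy) else init) := rfl

lemma pvBest_le (x y dx dy : Int) :
    ∀ (blo : List (Int × Int)) (init : Int), pvBest x y dx dy blo init ≤ init := by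
  intro blo
  induction blo with
  | nil => intro init; simp [pvBest]
  | cons b rest ih =>
    intro init
    rw [pvBest_cons]
    set jb := (if dx ≠ 0 then (b.1 - x) * dx else (b.2 - y) * dy) with hjbdef
    by_cases hc : b.1 = x + jb * dx ∧ b.2 = y + jb * dy ∧ 1 ≤ jb ∧ jb < init
    · rw [if_pos hc]
      exact le_trans (ih _) (le_of_lt hc.2.2.2)
    · rw [if_neg hc]
      exact ih init

lemma pvBest_stop (x y dx dy : Int) :
    ∀ (blo : List (Int × Int)) (init : Int),
      pvBest x y dx dy blo init = init ∨
        (1 ≤ pvBest x y dx dy blo init ∧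
          (x + (pvBest x y dx dy blo init) * dx, y + (pvBest x y dx dy blo init) * dy) ∈ blo) := by
  intro blo
  induction blo with
  | nil => intro init; left; simp [pvBest]
  | cons b rest ih =>
    intro init
    rw [pvBest_cons]
    set jb := (if dx ≠ 0 then (b.1 - x) * dx else (b.2 - y) * dy) with hjbdef
    by_cases hc : b.1 = x + jb * dx ∧ b.2 = y + jb * dy ∧ 1 ≤ jb ∧ jb < init
    · rw [if_pos hc]
      rcases ih jb with he | ⟨h1, hm⟩
      · right
        rw [he]
        refine ⟨hc.2.2.1, ?_⟩
        have hb : (x + jb * dx, y + jb * dy) = b := by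
          rw [← hc.1, ← hc.2.1]
        rw [hb]
        exact List.mem_cons_self
      · exact Or.inr ⟨h1, List.mem_cons_of_mem _ hm⟩
    · rw [if_neg hc]
      rcases ih init with he | ⟨h1, hm⟩
      · exact Or.inl he
      · exact Or.inr ⟨h1, List.mem_cons_of_mem _ hm⟩

lemma pvBest_min (x y dx dy : Int) (hdd : dx * dx = 1 ∨ (dx = 0 ∧ dy * dy = 1)) :
    ∀ (blo : List (Int × Int)) (init j : Int), 1 ≤ j →
      (x + j * dx, y + j * dy) ∈ blo →
      pvBest x y dx dy blo init ≤ j ∨ init ≤ j := by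
  intro blo
  induction blo with
  | nil => intro init j _ hm; simp at hm
  | cons b rest ih =>
    intro init j hj hm
    rw [pvBest_cons]
    set jb := (if dx ≠ 0 then (b.1 - x) * dx else (b.2 - y) * dy) with hjbdef
    by_cases hc : b.1 = x + jb * dx ∧ b.2 = y + jb * dy ∧ 1 ≤ jb ∧ jb < init
    · rw [if_pos hc]
      rcases List.mem_cons.mp hm with he | hmem
      · -- b is the blocking cell at step j, and jb = j
        have h1 : b.1 = x + j * dx := by rw [← he]
        have h2 : b.2 = y + j * dy := by rw [← he]
        have hjb : jb = j := hjbdef ▸ pvJb_eq x y dx dy hdd b j h1 h2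
        left
        calc pvBest x y dx dy rest jb ≤ jb := pvBest_le x y dx dy rest jb
          _ = j := hjb
      · rcases ih jb j hj hmem with hl | hr
        · exact Or.inl hl
        · exact Or.inl (le_trans (pvBest_le x y dx dy rest jb) hr)
    · rw [if_neg hc]
      rcases List.mem_cons.mp hm with he | hmem
      · have h1 : b.1 = x + j * dx := by rw [← he]
        have h2 : b.2 = y + j * dy := by rw [← he]
        have hjb : jb = j := hjbdef ▸ pvJb_eq x y dx dy hdd b j h1 h2
        have hni : ¬ (jb < init) := by
          intro hlt
          exact hc ⟨by rw [hjb, ← h1], by rw [hjb, ← h2], by rw [hjb]; exact hj, hlt⟩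
        right; omega
      · exact ih init j hj hmem

lemma pvWalk_run (tam dx dy L U r x y : Int) (blo : List (Int × Int))
    (hvalid : ∀ j : Int,
      (0 ≤ x + j * dx ∧ x + j * dx < tam ∧ 0 ≤ y + j * dy ∧ y + j * dy < tam) ↔ (L ≤ j ∧ j ≤ U))
    (hL : L ≤ 1)
    (hrle : r ≤ U + 1)
    (hstop : r = U + 1 ∨ (x + r * dx, y + r * dy) ∈ blo)
    (hmin : ∀ j, 1 ≤ j → (x + j * dx, y + j * dy) ∈ blo → r ≤ j) :
    ∀ (f : Nat) (j acc : Int), 1 ≤ j → j ≤ r → (r - j).toNat ≤ f →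
      pvWalkA tam dx dy (PySem.Set.ofList blo) f (x + j * dx) (y + j * dy) acc = acc + (r - j) := by
  intro f
  induction f with
  | zero =>
    intro j acc hj1 hjr hf
    have : r = j := by omega
    subst this
    simp [pvWalkA]
  | succ f ih =>
    intro j acc hj1 hjr hf
    by_cases hjlt : j < r
    · have hcond : 0 ≤ x + j * dx ∧ x + j * dx < tam ∧ 0 ≤ y + j * dy ∧ y + j * dy < tam ∧
          ¬ ((x + j * dx, y + j * dy) ∈ PySem.Set.ofList blo) := by
        have hv := (hvalid j).mpr ⟨by omega, by omega⟩
        refine ⟨hv.1, hv.2.1, hv.2.2.1, hv.2.2.2, ?_⟩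
        intro hmem
        have := hmin j hj1 ((PySem.Set.mem_ofList _ _).mp hmem)
        omega
      simp only [pvWalkA, if_pos hcond]
      have e1 : x + j * dx + dx = x + (j + 1) * dx := by ring
      have e2 : y + j * dy + dy = y + (j + 1) * dy := by ring
      rw [e1, e2, ih (j + 1) (acc + 1) (by omega) (by omega) (by omega)]
      omega
    · have hjr' : j = r := by omega
      subst hjr'
      have hcond : ¬ (0 ≤ x + j * dx ∧ x + j * dx < tam ∧ 0 ≤ y + j * dy ∧ y + j * dy < tam ∧
          ¬ ((x + j * dx, y + j * dy) ∈ PySem.Set.ofList blo)) := by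
        rcases hstop with he | hmem
        · intro hcc
          have := (hvalid j).mp ⟨hcc.1, hcc.2.1, hcc.2.2.1, hcc.2.2.2.1⟩
          omega
        · intro hcc
          exact hcc.2.2.2.2 ((PySem.Set.mem_ofList _ _).mpr hmem)
      rw [pvWalkA_stop _ _ _ _ _ _ _ _ hcond]
      omega

-- per-direction: A's walk (with any accumulator) equals B's ray count
lemma pvDir_eq (x y dx dy tam L U : Int) (blo : List (Int × Int))
    (hdd : dx * dx = 1 ∨ (dx = 0 ∧ dy * dy = 1))
    (hvalid : ∀ j : Int,
      (0 ≤ x + j * dx ∧ x + j * dx < tam ∧ 0 ≤ y + j * dy ∧ y + j * dy < tam) ↔ (L ≤ j ∧ j ≤ U))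
    (hUtam : L ≤ 1 → 1 ≤ U → U ≤ tam)
    (hiseq : pvRay x y dx dy tam blo =
      if L > 1 ∨ U < 1 then 0 else min U (pvBest x y dx dy blo (U + 1) - 1)) :
    ∀ acc : Int,
      pvWalkA tam dx dy (PySem.Set.ofList blo) tam.toNat (x + dx) (y + dy) acc =
        acc + pvRay x y dx dy tam blo := by
  intro acc
  rw [hiseq]
  by_cases hb : L ≤ 1 ∧ 1 ≤ U
  · have hle : pvBest x y dx dy blo (U + 1) ≤ U + 1 := pvBest_le x y dx dy blo (U + 1)
    have hstop0 := pvBest_stop x y dx dy blo (U + 1)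
    have hstop : pvBest x y dx dy blo (U + 1) = U + 1 ∨
        (x + (pvBest x y dx dy blo (U + 1)) * dx, y + (pvBest x y dx dy blo (U + 1)) * dy) ∈ blo := by
      rcases hstop0 with h | h
      · exact Or.inl h
      · exact Or.inr h.2
    have hmin : ∀ j, 1 ≤ j → (x + j * dx, y + j * dy) ∈ blo →
        pvBest x y dx dy blo (U + 1) ≤ j := by
      intro j hj hm
      rcases pvBest_min x y dx dy hdd blo (U + 1) j hj hm with h | h
      · exact h
      · omega
    have hr1 : 1 ≤ pvBest x y dx dy blo (U + 1) := by
      rcases hstop0 with he | ⟨h1, _⟩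
      · omega
      · exact h1
    have e1 : x + dx = x + 1 * dx := by ring
    have e2 : y + dy = y + 1 * dy := by ring
    rw [e1, e2, pvWalk_run tam dx dy L U (pvBest x y dx dy blo (U + 1)) x y blo hvalid hb.1 hle
      hstop hmin tam.toNat 1 acc le_rfl hr1 (by have := hUtam hb.1 hb.2; omega)]
    rw [if_neg (by omega)]
    omega
  · rw [if_pos (by omega)]
    have hcond : ¬ (0 ≤ x + dx ∧ x + dx < tam ∧ 0 ≤ y + dy ∧ y + dy < tam ∧
        ¬ ((x + dx, y + dy) ∈ PySem.Set.ofList blo)) := by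
      intro hcc
      have e1 : x + dx = x + 1 * dx := by ring
      have e2 : y + dy = y + 1 * dy := by ring
      rw [e1] at hcc; rw [e2] at hcc
      have := (hvalid 1).mp ⟨hcc.1, hcc.2.1, hcc.2.2.1, hcc.2.2.2.1⟩
      omega
    rw [pvWalkA_stop _ _ _ _ _ _ _ _ hcond]
    omega

-- ===== VERDICT (by name: the statement is the Claim_ definition above) =====
theorem movimientos_reina_spec : Claim_equal_movimientos_reina := by
  intro pos tam blo _
  unfold Spec_movimientos_reina movimientos_reina movimientos_reina_alt
  obtain ⟨x, y⟩ := pos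
  simp only [List.foldl_cons, List.foldl_nil]
  have hd1 : ∀ acc : Int,
      pvWalkA tam 1 0 (PySem.Set.ofList blo) tam.toNat (x + 1) (y + 0) acc =
        acc + pvRay x y 1 0 tam blo := by
    by_cases hio : 0 ≤ y ∧ y < tam
    · exact pvDir_eq x y 1 0 tam (-x) (tam - 1 - x) blo (Or.inl (by norm_num))
        (by intro j; omega) (by intro _ _; omega) (by simp [pvRay, hio])
    · exact pvDir_eq x y 1 0 tam 1 0 blo (Or.inl (by norm_num))
        (by intro j; omega) (by intro _ h; omega) (by simp [pvRay, hio])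
  have hd2 : ∀ acc : Int,
      pvWalkA tam (-1) 0 (PySem.Set.ofList blo) tam.toNat (x + (-1)) (y + 0) acc =
        acc + pvRay x y (-1) 0 tam blo := by
    by_cases hio : 0 ≤ y ∧ y < tam
    · exact pvDir_eq x y (-1) 0 tam (x - tam + 1) (x) blo (Or.inl (by norm_num))
        (by intro j; omega) (by intro _ _; omega) (by simp [pvRay, hio])
    · exact pvDir_eq x y (-1) 0 tam 1 0 blo (Or.inl (by norm_num))
        (by intro j; omega) (by intro _ h; omega) (by simp [pvRay, hio])
  have hd3 : ∀ acc : Int,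
      pvWalkA tam 0 1 (PySem.Set.ofList blo) tam.toNat (x + 0) (y + 1) acc =
        acc + pvRay x y 0 1 tam blo := by
    by_cases hio : 0 ≤ x ∧ x < tam
    · exact pvDir_eq x y 0 1 tam (-y) (tam - 1 - y) blo (Or.inr ⟨rfl, by norm_num⟩)
        (by intro j; omega) (by intro _ _; omega) (by simp [pvRay, hio])
    · exact pvDir_eq x y 0 1 tam 1 0 blo (Or.inr ⟨rfl, by norm_num⟩)
        (by intro j; omega) (by intro _ h; omega) (by simp [pvRay, hio])
  have hd4 : ∀ acc : Int,
      pvWalkA tam 0 (-1) (PySem.Set.ofList blo) tam.toNat (x + 0) (y + (-1)) acc =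
        acc + pvRay x y 0 (-1) tam blo := by
    by_cases hio : 0 ≤ x ∧ x < tam
    · exact pvDir_eq x y 0 (-1) tam (y - tam + 1) (y) blo (Or.inr ⟨rfl, by norm_num⟩)
        (by intro j; omega) (by intro _ _; omega) (by simp [pvRay, hio])
    · exact pvDir_eq x y 0 (-1) tam 1 0 blo (Or.inr ⟨rfl, by norm_num⟩)
        (by intro j; omega) (by intro _ h; omega) (by simp [pvRay, hio])
  have hd5 : ∀ acc : Int,
      pvWalkA tam 1 1 (PySem.Set.ofList blo) tam.toNat (x + 1) (y + 1) acc =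
        acc + pvRay x y 1 1 tam blo := by
    exact pvDir_eq x y 1 1 tam (max (-x) (-y)) (min (tam - 1 - x) (tam - 1 - y)) blo (Or.inl (by norm_num))
      (by intro j; omega) (by intro _ _; omega) (by simp [pvRay])
  have hd6 : ∀ acc : Int,
      pvWalkA tam (-1) (-1) (PySem.Set.ofList blo) tam.toNat (x + (-1)) (y + (-1)) acc =
        acc + pvRay x y (-1) (-1) tam blo := by
    exact pvDir_eq x y (-1) (-1) tam (max (x - tam + 1) (y - tam + 1)) (min (x) (y)) blo (Or.inl (by norm_num))
      (by intro j; omega) (by intro _ _; omega) (by simp [pvRay])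
  have hd7 : ∀ acc : Int,
      pvWalkA tam 1 (-1) (PySem.Set.ofList blo) tam.toNat (x + 1) (y + (-1)) acc =
        acc + pvRay x y 1 (-1) tam blo := by
    exact pvDir_eq x y 1 (-1) tam (max (-x) (y - tam + 1)) (min (tam - 1 - x) (y)) blo (Or.inl (by norm_num))
      (by intro j; omega) (by intro _ _; omega) (by simp [pvRay])
  have hd8 : ∀ acc : Int,
      pvWalkA tam (-1) 1 (PySem.Set.ofList blo) tam.toNat (x + (-1)) (y + 1) acc =
        acc + pvRay x y (-1) 1 tam blo := by
    exact pvDir_eq x y (-1) 1 tam (max (x - tam + 1) (-y)) (min (x) (tam - 1 - y)) blo (Or.inl (by norm_num))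
      (by intro j; omega) (by intro _ _; omega) (by simp [pvRay])
  simp only [hd1, hd2, hd3, hd4, hd5, hd6, hd7, hd8]
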